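-- pv_equiv track=rewrite | github.com/semodi/libnxc | pylibnxc/pyscf/utils.py | find_max_level
-- ===== SOURCE A (Python) =====
-- def find_max_level(parsed_xc):
--
--     xc_levels = {'LDA': 0, 'GGA': 1, 'MGGA': 2}
--     parsed_xc = parsed_xc[1]
--     highest_xc = 'LDA'
--     highest_level = 0
--     for xc in parsed_xc:
--         l = xc[0].split('_')[0]
--         if xc_levels[l] > highest_level:
--             highest_xc = l
--             highest_level = xc_levels[l]
--
--     return highest_xc
-- ===== SOURCE B (Python) =====
-- def find_max_level(parsed_xc):
--     xc_levels = {'LDA': 0, 'GGA': 1, 'MGGA': 2}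
--     present = {xc_levels[xc[0].split('_')[0]] for xc in parsed_xc[1]}
--     names = {0: 'LDA', 1: 'GGA', 2: 'MGGA'}
--     for lvl in (2, 1, 0):
--         if lvl in present:
--             return names[lvl]
--     return 'LDA'
-- ===== Notes on version B (the rewrite author's own statement) =====
-- stated objective: alternative
-- what changed: A tracks a running maximum with a name/level accumulator pair; B first builds the set of levels present in one pass and then scans the fixed priority list 2,1,0, returning the reverse-mapped name of the first level found (default 'LDA').
import Mathlib
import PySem

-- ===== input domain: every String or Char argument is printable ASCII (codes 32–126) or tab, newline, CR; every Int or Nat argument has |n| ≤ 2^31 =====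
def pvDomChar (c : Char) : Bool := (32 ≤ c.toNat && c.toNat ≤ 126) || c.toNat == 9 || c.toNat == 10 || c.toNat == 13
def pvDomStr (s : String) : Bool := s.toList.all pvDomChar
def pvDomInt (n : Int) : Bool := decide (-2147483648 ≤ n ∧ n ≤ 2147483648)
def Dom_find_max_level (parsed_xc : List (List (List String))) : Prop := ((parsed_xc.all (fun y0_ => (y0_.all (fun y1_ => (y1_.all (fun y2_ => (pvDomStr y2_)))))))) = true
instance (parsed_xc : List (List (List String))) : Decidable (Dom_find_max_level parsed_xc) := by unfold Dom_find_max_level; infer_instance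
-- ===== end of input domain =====

-- B replaces A's running (name, level) maximum-tracking scan by: build the set of levels present, then scan the fixed priority list 2,1,0.

-- xc[0].split('_')[0]  (shared sub-expression of both programs and of Pre_)
def pvLevelStr (xc : List String) : String :=
  ((PySem.Str.split? (xc.headD "") "_").getD []).headD ""

-- the dict xc_levels = {'LDA': 0, 'GGA': 1, 'MGGA': 2} (appears verbatim in both programs)
def pvXcLevels : PySem.Dict String Int :=
  PySem.Dict.ofList [("LDA", 0), ("GGA", 1), ("MGGA", 2)]

-- ===== PORT A =====
def find_max_level (parsed_xc : List (List (List String))) : String :=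
  let pxc := (PySem.List.pyGet? parsed_xc 1).getD []   -- parsed_xc[1]; none (IndexError) excluded by Pre_
  (pxc.foldl (fun (st : String × Int) xc =>
      let l := pvLevelStr xc
      match pvXcLevels.get? l with
      | some v => if v > st.2 then (l, v) else st
      | none => st)                                     -- KeyError; excluded by Pre_
    ("LDA", 0)).1

-- ===== PORT B =====
def pvNames : PySem.Dict Int String :=
  PySem.Dict.ofList [(0, "LDA"), (1, "GGA"), (2, "MGGA")]

def pvPresent (parsed_xc : List (List (List String))) : PySem.Set Int :=
  PySem.Set.ofList (((PySem.List.pyGet? parsed_xc 1).getD []).map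
    (fun xc => (pvXcLevels.get? (pvLevelStr xc)).getD (-1)))   -- getD: KeyError excluded by Pre_

def pvPick (present : PySem.Set Int) : List Int → String
  | [] => "LDA"
  | lvl :: rest =>
      if PySem.Set.contains present lvl then (pvNames.get? lvl).getD "LDA"
      else pvPick present rest

def find_max_level_alt (parsed_xc : List (List (List String))) : String :=
  pvPick (pvPresent parsed_xc) [2, 1, 0]

-- ===== PRECONDITION & SPEC =====
-- Pre_ excludes exactly the inputs where the Python A raises: parsed_xc[1] out of range
-- (IndexError; also covers the IndexError on xc[0] for an empty xc, whose level string is ""),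
-- or a level string outside the keys of xc_levels (KeyError).
def Pre_find_max_level (parsed_xc : List (List (List String))) : Prop :=
  2 ≤ parsed_xc.length ∧
  ∀ xc ∈ parsed_xc.getD 1 [], pvLevelStr xc ∈ (["LDA", "GGA", "MGGA"] : List String)
instance (parsed_xc : List (List (List String))) : Decidable (Pre_find_max_level parsed_xc) := by
  unfold Pre_find_max_level; infer_instance

def pvWitness_find_max_level : List (List (List String)) :=
  [[["GGA_X_B88"]], [["GGA_X_B88"], ["LDA_C_PW"], ["MGGA_C"]]]

def Spec_find_max_level (parsed_xc : List (List (List String))) (out : String) : Prop := out = find_max_level_alt parsed_xc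
instance (parsed_xc : List (List (List String))) (out : String) : Decidable (Spec_find_max_level parsed_xc out) := by unfold Spec_find_max_level; infer_instance

-- ===== CLAIM (what is proved, stated in full; the proofs are below) =====
def Claim_equal_find_max_level : Prop := ∀ (parsed_xc : List (List (List String))), Dom_find_max_level parsed_xc → Pre_find_max_level parsed_xc → Spec_find_max_level parsed_xc (find_max_level parsed_xc)

-- ===== LEMMAS AND PROOFS =====

-- the level value f xc and the name-of-value map, used only by the proofs
def pvVal (xc : List String) : Int := (pvXcLevels.get? (pvLevelStr xc)).getD (-1)
def pvNameOf (v : Int) : String := (pvNames.get? v).getD "LDA"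

lemma pvLevel_cases {xc : List String}
    (h : pvLevelStr xc ∈ (["LDA", "GGA", "MGGA"] : List String)) :
    pvXcLevels.get? (pvLevelStr xc) = some (pvVal xc) ∧
    (pvVal xc = 0 ∨ pvVal xc = 1 ∨ pvVal xc = 2) ∧
    pvLevelStr xc = pvNameOf (pvVal xc) := by
  simp only [List.mem_cons, List.not_mem_nil, or_false] at h
  rcases h with h | h | h <;> simp only [pvVal, pvNameOf, h] <;> decide

lemma foldl_max_le {ls : List Int} {b c : Int} (hb : b ≤ c) (h : ∀ v ∈ ls, v ≤ c) :
    ls.foldl max b ≤ c := by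
  induction ls generalizing b with
  | nil => exact hb
  | cons x t ih =>
      exact ih (max_le hb (h x (by simp))) (fun v hv => h v (by simp [hv]))

lemma le_foldl_max_self {ls : List Int} (b : Int) : b ≤ ls.foldl max b := by
  induction ls generalizing b with
  | nil => exact le_refl _
  | cons x t ih => exact le_trans (le_max_left b x) (ih _)

lemma mem_le_foldl_max {ls : List Int} {v : Int} (b : Int) (h : v ∈ ls) :
    v ≤ ls.foldl max b := by
  induction ls generalizing b with
  | nil => cases h
  | cons x t ih =>
      rcases List.mem_cons.mp h with rfl | h
      · exact le_trans (le_max_right b v) (le_foldl_max_self _)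
      · exact ih _ h

-- A's fold computes (name of the running maximum, the running maximum)
lemma foldA_eq (ls : List (List String))
    (h : ∀ xc ∈ ls, pvLevelStr xc ∈ (["LDA", "GGA", "MGGA"] : List String))
    (hl : Int) :
    ls.foldl (fun (st : String × Int) xc =>
        let l := pvLevelStr xc
        match pvXcLevels.get? l with
        | some v => if v > st.2 then (l, v) else st
        | none => st)
      (pvNameOf hl, hl)
    = (pvNameOf ((ls.map pvVal).foldl max hl), (ls.map pvVal).foldl max hl) := by
  induction ls generalizing hl with
  | nil => rfl
  | cons xc t ih =>
      obtain ⟨hget, _, hname⟩ := pvLevel_cases (h xc (by simp))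
      have ht : ∀ y ∈ t, pvLevelStr y ∈ (["LDA", "GGA", "MGGA"] : List String) :=
        fun y hy => h y (by simp [hy])
      simp only [List.foldl_cons, List.map_cons, hget]
      by_cases hgt : pvVal xc > hl
      · have : max hl (pvVal xc) = pvVal xc := max_eq_right (le_of_lt hgt)
        simpa [hgt, hname, this] using ih ht (pvVal xc)
      · have : max hl (pvVal xc) = hl := max_eq_left (not_lt.mp hgt)
        simpa [hgt, this] using ih ht hl

-- B's priority scan returns the name of the maximum present level (default 0)
lemma pick_eq (vs : List Int)
    (h : ∀ v ∈ vs, v = 0 ∨ v = 1 ∨ v = 2) :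
    pvPick (PySem.Set.ofList vs) [2, 1, 0] = pvNameOf (vs.foldl max 0) := by
  have hmem : ∀ x : Int, PySem.Set.contains (PySem.Set.ofList vs) x = true ↔ x ∈ vs := by
    intro x
    rw [PySem.Set.contains_iff, PySem.Set.mem_ofList]
  by_cases h2 : (2 : Int) ∈ vs
  · have hmax : vs.foldl max 0 = 2 :=
      le_antisymm
        (foldl_max_le (by norm_num) (fun v hv => by rcases h v hv with rfl | rfl | rfl <;> norm_num))
        (mem_le_foldl_max _ h2)
    simp [pvPick, h2, hmax]; rfl
  · by_cases h1 : (1 : Int) ∈ vs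
    · have hmax : vs.foldl max 0 = 1 :=
        le_antisymm
          (foldl_max_le (by norm_num)
            (fun v hv => by
              rcases h v hv with rfl | rfl | rfl
              · norm_num
              · norm_num
              · exact absurd hv h2))
          (mem_le_foldl_max _ h1)
      simp [pvPick, h2, h1, hmax]; rfl
    · have hmax : vs.foldl max 0 = 0 :=
        le_antisymm
          (foldl_max_le (le_refl _)
            (fun v hv => by
              rcases h v hv with rfl | rfl | rfl
              · exact le_refl _
              · exact absurd hv h1
              · exact absurd hv h2))
          (le_foldl_max_self _)
      by_cases h0 : (0 : Int) ∈ vs <;> simp [pvPick, h2, h1, h0, hmax] <;> rfl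

lemma pyGet_one {α : Type} (xs : List α) (d : α) (h : 2 ≤ xs.length) :
    PySem.List.pyGet? xs 1 = some (xs.getD 1 d) := by
  match xs, h with
  | x :: y :: t, _ => simp [PySem.List.pyGet?, PySem.List.pyIdx?]

-- ===== VERDICT (by name: the statement is the Claim_ definition above) =====
theorem find_max_level_spec : Claim_equal_find_max_level := by
  intro parsed_xc _ hpre
  obtain ⟨hlen, hxc⟩ := hpre
  unfold Spec_find_max_level find_max_level find_max_level_alt pvPresent
  rw [pyGet_one parsed_xc [] hlen]
  set ls := parsed_xc.getD 1 [] with hls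
  have h0 : pvNameOf 0 = "LDA" := rfl
  have hA := foldA_eq ls hxc 0
  rw [h0] at hA
  simp only [Option.getD_some]
  rw [hA]
  have hvals : ∀ v ∈ ls.map pvVal, v = 0 ∨ v = 1 ∨ v = 2 := by
    intro v hv
    obtain ⟨xc, hxcm, rfl⟩ := List.mem_map.mp hv
    exact (pvLevel_cases (hxc xc hxcm)).2.1
  have hB := pick_eq (ls.map pvVal) hvals
  have hmap : ls.map (fun xc => (pvXcLevels.get? (pvLevelStr xc)).getD (-1)) = ls.map pvVal := rfl
  rw [hmap, hB]
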